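-- pv_equiv track=rewrite | github.com/hisnju/nlplaw | etl/MOEX_考選部歷屆考題/4.merge_qus_ans.py | merge_dicts_with_same_keys
-- ===== SOURCE A (Python) =====
-- def merge_dicts_with_same_keys(list1, list2):
--     # 确定两个列表中所有字典共同具有的键
--     common_keys = set(list1[0].keys()).intersection(set(list2[0].keys()))
--
--     merged_list = []
--     for dict1 in list1:
--         for dict2 in list2:
--             if all(dict1[key] == dict2[key] for key in common_keys):
--                 merged_dict = {**dict1, **dict2}  # 合并字典
--                 merged_list.append(merged_dict)
--
--     return merged_list
-- ===== SOURCE B (Python) =====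
-- def merge_dicts_with_same_keys(list1, list2):
--     # hash join: index list2 by the tuple of common-key values, preserving order
--     keys2 = set(list2[0].keys())
--     ckeys = [k for k in list1[0].keys() if k in keys2]
--     index = {}
--     for d2 in list2:
--         index.setdefault(tuple(d2.get(k) for k in ckeys), []).append(d2)
--     merged_list = []
--     for d1 in list1:
--         for d2 in index.get(tuple(d1.get(k) for k in ckeys), []):
--             merged_list.append({**d1, **d2})
--     return merged_list
-- ===== Notes on version B (the rewrite author's own statement) =====
-- stated objective: alternative
-- what changed: Replaces the nested scan of list2 for every dict of list1 by a hash join: list2 is indexed once by the tuple of its common-key values and each dict of list1 then does a single dictionary lookup instead of scanning all of list2 (same output, including order).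
-- outside the precondition, e.g. on merge_dicts_with_same_keys([], []): A raises IndexError, B raises IndexError
import Mathlib
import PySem

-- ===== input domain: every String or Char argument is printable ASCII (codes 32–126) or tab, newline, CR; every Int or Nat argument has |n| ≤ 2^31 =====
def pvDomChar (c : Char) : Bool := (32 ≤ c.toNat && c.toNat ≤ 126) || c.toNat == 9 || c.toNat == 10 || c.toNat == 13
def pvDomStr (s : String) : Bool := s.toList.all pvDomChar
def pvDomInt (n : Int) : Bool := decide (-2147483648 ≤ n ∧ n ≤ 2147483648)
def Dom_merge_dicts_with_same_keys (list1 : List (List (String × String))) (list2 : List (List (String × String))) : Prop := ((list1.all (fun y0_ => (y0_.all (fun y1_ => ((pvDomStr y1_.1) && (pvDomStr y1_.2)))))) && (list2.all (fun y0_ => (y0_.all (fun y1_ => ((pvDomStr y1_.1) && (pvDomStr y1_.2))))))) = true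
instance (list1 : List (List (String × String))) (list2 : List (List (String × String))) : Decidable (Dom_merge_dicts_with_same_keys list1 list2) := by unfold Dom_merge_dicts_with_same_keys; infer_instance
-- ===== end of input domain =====

-- B replaces A's nested scan by a hash join (index list2 once by the tuple of common-key values,
-- then one lookup per dict of list1); the equivalence proved is about the return value on Pre_.

-- ===== PORT A =====
-- {**d1, **d2} (both Pythons build the merged dict this way): start from d1, update with d2's pairs
def pvMergeTwo (d1 d2 : List (String × String)) : List (String × String) :=
  (d2.foldl (fun acc kv => acc.insert kv.1 kv.2) (PySem.Dict.mk d1)).items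

-- dict1[key] == dict2[key]: ported as get? == get?; exact under Pre_ (every common key present),
-- where Python's subscript never raises. all() over the set is order-independent, so PySem.Set is sound here.
def merge_dicts_with_same_keys (list1 : List (List (String × String))) (list2 : List (List (String × String))) : List (List (String × String)) :=
  let common_keys : PySem.Set String :=
    PySem.Set.inter (PySem.Set.ofList ((list1.headD []).map Prod.fst))
                    (PySem.Set.ofList ((list2.headD []).map Prod.fst))
  list1.foldl (fun acc dict1 =>
    list2.foldl (fun acc dict2 =>
      if common_keys.all (fun k => (PySem.Dict.mk dict1).get? k == (PySem.Dict.mk dict2).get? k)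
      then acc ++ [pvMergeTwo dict1 dict2] else acc) acc) []

-- ===== PORT B =====
-- tuple(d.get(k) for k in ckeys)
def pvKeyOf (ck : List String) (d : List (String × String)) : List (Option String) :=
  ck.map (fun k => (PySem.Dict.mk d).get? k)

def merge_dicts_with_same_keys_alt (list1 : List (List (String × String))) (list2 : List (List (String × String))) : List (List (String × String)) :=
  let keys2 : PySem.Set String := PySem.Set.ofList ((list2.headD []).map Prod.fst)
  let ckeys : List String := ((list1.headD []).map Prod.fst).filter (fun k => keys2.contains k)
  -- index.setdefault(key, []).append(d2)  =  index[key] = index.get(key, []) + [d2], position kept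
  let index : PySem.Dict (List (Option String)) (List (List (String × String))) :=
    list2.foldl (fun idx d2 => idx.modify (pvKeyOf ckeys d2) [] (fun l => l ++ [d2])) PySem.Dict.empty
  list1.foldl (fun acc d1 =>
    acc ++ (index.getD (pvKeyOf ckeys d1) []).map (fun d2 => pvMergeTwo d1 d2)) []

-- ===== PRECONDITION & SPEC =====
-- Pre_ excludes empty lists (A raises IndexError on list[0]) and inputs where some dict lacks a key
-- common to the two head dicts: there A's subscript dict[key] raises KeyError, except that with
-- several common keys the random hash iteration order of the set can short-circuit past it, making
-- A's outcome a seed-dependent accident.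
def Pre_merge_dicts_with_same_keys (list1 : List (List (String × String))) (list2 : List (List (String × String))) : Prop :=
  list1 ≠ [] ∧ list2 ≠ [] ∧
  ∀ k ∈ (list1.headD []).map Prod.fst, k ∈ (list2.headD []).map Prod.fst →
    ((∀ d ∈ list1, k ∈ d.map Prod.fst) ∧ (∀ d ∈ list2, k ∈ d.map Prod.fst))
instance (list1 : List (List (String × String))) (list2 : List (List (String × String))) : Decidable (Pre_merge_dicts_with_same_keys list1 list2) := by unfold Pre_merge_dicts_with_same_keys; infer_instance
def pvWitness_merge_dicts_with_same_keys : (List (List (String × String))) × (List (List (String × String))) :=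
  ([[("a", "x")], [("a", "y")]], [[("a", "y"), ("b", "z")]])

def Spec_merge_dicts_with_same_keys (list1 : List (List (String × String))) (list2 : List (List (String × String))) (out : List (List (String × String))) : Prop := out = merge_dicts_with_same_keys_alt list1 list2
instance (list1 : List (List (String × String))) (list2 : List (List (String × String))) (out : List (List (String × String))) : Decidable (Spec_merge_dicts_with_same_keys list1 list2 out) := by unfold Spec_merge_dicts_with_same_keys; infer_instance

-- ===== CLAIM (what is proved, stated in full; the proofs are below) =====
def Claim_equal_merge_dicts_with_same_keys : Prop := ∀ (list1 : List (List (String × String))) (list2 : List (List (String × String))), Dom_merge_dicts_with_same_keys list1 list2 → Pre_merge_dicts_with_same_keys list1 list2 → Spec_merge_dicts_with_same_keys list1 list2 (merge_dicts_with_same_keys list1 list2)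
-- ===== LEMMAS AND PROOFS =====

-- B's index, looked up at key c, is exactly the order-preserving group of list2 at c
theorem pv_index_getD (l2 : List (List (String × String))) (ck : List String) (c : List (Option String)) :
    (l2.foldl (fun idx d2 => idx.modify (pvKeyOf ck d2) [] (fun l => l ++ [d2])) PySem.Dict.empty).getD c []
      = l2.filter (fun d2 => pvKeyOf ck d2 == c) := by
  have h := PySem.Dict.getD_foldl_modify_append (l := l2.map (fun d => (pvKeyOf ck d, d)))
      (d := (PySem.Dict.empty : PySem.Dict (List (Option String)) (List (List (String × String))))) (c := c)
  rw [List.foldl_map] at h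
  rw [h]
  simp [List.filter_map, Function.comp_def]

-- A's membership test over the common-key set equals equality of B's key tuples
theorem pv_cond_eq (k1 k2 : List String) (d1 d2 : List (String × String)) :
    (PySem.Set.inter (PySem.Set.ofList k1) (PySem.Set.ofList k2)).all
        (fun k => (PySem.Dict.mk d1).get? k == (PySem.Dict.mk d2).get? k)
      = (pvKeyOf (k1.filter (fun k => (PySem.Set.ofList k2).contains k)) d1
          == pvKeyOf (k1.filter (fun k => (PySem.Set.ofList k2).contains k)) d2) := by
  rw [Bool.eq_iff_iff]
  simp only [List.all_eq_true, pvKeyOf, beq_iff_eq, List.map_inj_left, List.mem_filter]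
  constructor
  · intro h k hk
    exact h k (by simp [PySem.Set.mem_inter, PySem.Set.mem_ofList, hk.1,
      (by simpa [PySem.Set.mem_ofList] using (PySem.Set.contains_iff (s := PySem.Set.ofList k2) (x := k)).1 hk.2 : k ∈ k2)])
  · intro h k hk
    have hk' : k ∈ k1 ∧ k ∈ k2 := by simpa [PySem.Set.mem_inter, PySem.Set.mem_ofList] using hk
    exact h k ⟨hk'.1, by simp [PySem.Set.mem_ofList, hk'.2]⟩

-- ===== VERDICT (by name: the statement is the Claim_ definition above) =====
theorem merge_dicts_with_same_keys_spec : Claim_equal_merge_dicts_with_same_keys := by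
  intro list1 list2 _ _
  unfold Spec_merge_dicts_with_same_keys merge_dicts_with_same_keys merge_dicts_with_same_keys_alt
  simp only [PySem.List.foldl_append_if, pv_index_getD, PySem.List.foldl_append_eq_flatMap,
    List.nil_append]
  congr 1
  funext d1
  rw [List.filter_congr (fun d2 _ => by rw [pv_cond_eq])]
  congr 1
  apply List.filter_congr
  intro d2 _
  rw [Bool.eq_iff_iff, beq_iff_eq, beq_iff_eq]
  exact eq_comm
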